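-- pv_equiv track=rewrite | github.com/domain-independent-dp/didp-rs | didppy/examples/mosp/read_mosp.py | item_order_to_pattern_order
-- ===== SOURCE A (Python) =====
-- def item_order_to_pattern_order(item_to_patterns, items):
--     produced = set()
--     solution = []
--     for i in items:
--         for j in item_to_patterns[i]:
--             if j not in produced:
--                 solution.append(j)
--                 produced.add(j)
--     return solution
-- ===== SOURCE B (Python) =====
-- def item_order_to_pattern_order(item_to_patterns, items):
--     remaining = [j for i in items for j in item_to_patterns[i]]
--     solution = []
--     while remaining:
--         head = remaining[0]
--         solution.append(head)
--         remaining = [x for x in remaining[1:] if x != head]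
--     return solution
-- ===== Notes on version B (the rewrite author's own statement) =====
-- stated objective: alternative
-- what changed: B first flattens all pattern lists, then deduplicates by eager deletion: repeatedly take the head of the remaining list and filter out all its later occurrences, so no seen-set and no membership branch are maintained.
import Mathlib
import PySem

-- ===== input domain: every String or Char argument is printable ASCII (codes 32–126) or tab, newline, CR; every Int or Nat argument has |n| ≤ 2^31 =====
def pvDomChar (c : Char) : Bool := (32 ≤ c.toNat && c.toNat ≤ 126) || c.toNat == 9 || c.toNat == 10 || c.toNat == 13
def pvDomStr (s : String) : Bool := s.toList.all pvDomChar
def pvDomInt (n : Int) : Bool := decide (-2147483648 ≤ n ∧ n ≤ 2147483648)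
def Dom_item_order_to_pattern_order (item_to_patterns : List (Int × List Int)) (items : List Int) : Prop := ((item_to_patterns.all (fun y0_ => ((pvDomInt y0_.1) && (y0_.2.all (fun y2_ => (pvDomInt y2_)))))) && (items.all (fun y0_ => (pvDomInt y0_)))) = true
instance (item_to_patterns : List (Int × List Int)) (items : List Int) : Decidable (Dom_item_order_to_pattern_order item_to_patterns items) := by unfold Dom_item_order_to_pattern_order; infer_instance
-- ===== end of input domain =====

-- B flattens all pattern lists and then deduplicates by eager deletion (repeatedly take the
-- head and filter out its later occurrences) instead of A's seen-set + membership branch;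
-- same return value, different algorithm (B is quadratic in distinct patterns, not faster).

-- ===== PORT A =====
def item_order_to_pattern_order (item_to_patterns : List (Int × List Int)) (items : List Int) : List Int :=
  -- produced = set(); solution = []; nested loops with membership branch; dict lookup total under Pre_
  (items.foldl
    (fun st i =>
      (((PySem.Dict.mk item_to_patterns).get? i).getD []).foldl
        (fun st j =>
          if PySem.Set.contains st.1 j then st
          else (PySem.Set.add st.1 j, st.2 ++ [j]))
        st)
    ((PySem.Set.empty : PySem.Set Int), ([] : List Int))).2

-- ===== PORT B =====
-- the while-loop of Source B: state is the remaining list, which shrinks each pass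
def pvNub : List Int → List Int
  | [] => []
  | h :: t => h :: pvNub (t.filter (fun x => x != h))
  termination_by l => l.length
  decreasing_by simpa using Nat.lt_succ_of_le (List.length_filter_le _ _)

def item_order_to_pattern_order_alt (item_to_patterns : List (Int × List Int)) (items : List Int) : List Int :=
  pvNub (items.flatMap (fun i => ((PySem.Dict.mk item_to_patterns).get? i).getD []))

-- ===== PRECONDITION & SPEC =====
-- Pre_ excludes exactly the inputs where Python A raises KeyError: some item of items is not a key of the dict.
def Pre_item_order_to_pattern_order (item_to_patterns : List (Int × List Int)) (items : List Int) : Prop :=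
  items.all (fun i => (PySem.Dict.mk item_to_patterns).contains i) = true
instance (item_to_patterns : List (Int × List Int)) (items : List Int) : Decidable (Pre_item_order_to_pattern_order item_to_patterns items) := by unfold Pre_item_order_to_pattern_order; infer_instance
def pvWitness_item_order_to_pattern_order : (List (Int × List Int)) × List Int :=
  ([(0, [1, 2]), (1, [2, 3])], [1, 0, 1])

def Spec_item_order_to_pattern_order (item_to_patterns : List (Int × List Int)) (items : List Int) (out : List Int) : Prop := out = item_order_to_pattern_order_alt item_to_patterns items
instance (item_to_patterns : List (Int × List Int)) (items : List Int) (out : List Int) : Decidable (Spec_item_order_to_pattern_order item_to_patterns items out) := by unfold Spec_item_order_to_pattern_order; infer_instance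

-- ===== CLAIM (what is proved, stated in full; the proofs are below) =====
def Claim_equal_item_order_to_pattern_order : Prop := ∀ (item_to_patterns : List (Int × List Int)) (items : List Int), Dom_item_order_to_pattern_order item_to_patterns items → Pre_item_order_to_pattern_order item_to_patterns items → Spec_item_order_to_pattern_order item_to_patterns items (item_order_to_pattern_order item_to_patterns items)

-- ===== LEMMAS AND PROOFS =====

-- A's inner loop from a state whose two components are equal keeps them equal,
-- and each component is the Set.add fold.
theorem pv_inner_eq (l : List Int) (s : List Int) :
    l.foldl
      (fun st j =>
        if PySem.Set.contains st.1 j then st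
        else (PySem.Set.add st.1 j, st.2 ++ [j]))
      (s, s)
    = (l.foldl PySem.Set.add s, l.foldl PySem.Set.add s) := by
  induction l generalizing s with
  | nil => rfl
  | cons j t ih =>
      simp only [List.foldl_cons]
      by_cases h : PySem.Set.contains s j = true
      · have ha : PySem.Set.add s j = s := by
          simp [PySem.Set.contains] at h; simp [PySem.Set.add, PySem.Set.contains, h]
        simp only [h, if_true, ha]
        exact ih s
      · have ha : PySem.Set.add s j = s ++ [j] := by
          simp [PySem.Set.contains] at h; simp [PySem.Set.add, PySem.Set.contains, h]
        simp only [h, if_false, Bool.false_eq_true, ha]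
        exact ih (s ++ [j])

-- A's nested loop equals the Set.add fold over the flattened list.
theorem pv_outer_eq (pat : Int → List Int) (items : List Int) (s : List Int) :
    (items.foldl
      (fun st i =>
        (pat i).foldl
          (fun st j =>
            if PySem.Set.contains st.1 j then st
            else (PySem.Set.add st.1 j, st.2 ++ [j]))
          st)
      (s, s)).2
    = (items.flatMap pat).foldl PySem.Set.add s := by
  induction items generalizing s with
  | nil => rfl
  | cons i t ih =>
      simp only [List.foldl_cons, List.flatMap_cons, List.foldl_append]
      rw [pv_inner_eq]
      exact ih ((pat i).foldl PySem.Set.add s)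

-- The seen-set fold equals the seen set followed by eager-deletion nub of the unseen part.
theorem pv_fold_eq_nub (l : List Int) (s : List Int) :
    l.foldl PySem.Set.add s = s ++ pvNub (l.filter (fun x => !(PySem.Set.contains s x))) := by
  induction l generalizing s with
  | nil => simp [pvNub]
  | cons h t ih =>
      simp only [List.foldl_cons, List.filter_cons]
      by_cases hc : h ∈ s
      · have ha : PySem.Set.add s h = s := by simp [PySem.Set.add, PySem.Set.contains, hc]
        have hc' : (!PySem.Set.contains s h) = false := by simp [PySem.Set.contains, hc]
        rw [hc', if_neg (by simp), ha]
        exact ih s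
      · have ha : PySem.Set.add s h = s ++ [h] := by
          simp [PySem.Set.add, PySem.Set.contains, hc]
        have hc' : (!PySem.Set.contains s h) = true := by simp [PySem.Set.contains, hc]
        rw [hc', if_pos rfl, ha, ih (s ++ [h]), pvNub]
        have hp : (fun x => !PySem.Set.contains (s ++ [h]) x)
            = (fun x => (!PySem.Set.contains s x) && (x != h)) := by
          funext x
          by_cases hx : x = h <;> simp [hx, PySem.Set.contains]
        rw [hp, ← List.filter_filter]
        simp only [List.append_assoc, List.singleton_append]
        congr 2
        rw [List.filter_filter, List.filter_filter]
        congr 1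
        apply List.filter_congr
        intro x _
        rw [Bool.and_comm]

-- ===== VERDICT (by name: the statement is the Claim_ definition above) =====
theorem item_order_to_pattern_order_spec : Claim_equal_item_order_to_pattern_order := by
  intro m items _ _
  unfold Spec_item_order_to_pattern_order item_order_to_pattern_order item_order_to_pattern_order_alt
  rw [show (PySem.Set.empty : PySem.Set Int) = ([] : List Int) from rfl,
    pv_outer_eq (fun i => ((PySem.Dict.mk m).get? i).getD []) items [],
    pv_fold_eq_nub]
  simp [PySem.Set.contains]
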